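-- pv_equiv track=rewrite | github.com/Worfran/Control | Python/Hexaca.py | calculadora_bi
-- ===== SOURCE A (Python) =====
-- def calculadora_bi(n):
--     bi=[]
--     condicion= True
--     while condicion:
--         res=str(n%2)
--         n=n//2
--         bi.insert(0,res)
--         if n == 0 or n == 1:
--             condicion = False
--     bi.insert(0, str(n))
--     numero = "".join(bi)
--     numero=int(numero)
--     return numero
-- ===== SOURCE B (Python) =====
-- def calculadora_bi(n):
--     return int(format(n, "b"))
-- ===== Notes on version B (the rewrite author's own statement) =====
-- stated objective: idiomatic
-- what changed: Replaced the digit-accumulating while-loop with its list of one-character strings, front insertions and final ''.join/int() reparse by the single standard-library expression int(format(n, 'b')).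
import Mathlib
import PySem

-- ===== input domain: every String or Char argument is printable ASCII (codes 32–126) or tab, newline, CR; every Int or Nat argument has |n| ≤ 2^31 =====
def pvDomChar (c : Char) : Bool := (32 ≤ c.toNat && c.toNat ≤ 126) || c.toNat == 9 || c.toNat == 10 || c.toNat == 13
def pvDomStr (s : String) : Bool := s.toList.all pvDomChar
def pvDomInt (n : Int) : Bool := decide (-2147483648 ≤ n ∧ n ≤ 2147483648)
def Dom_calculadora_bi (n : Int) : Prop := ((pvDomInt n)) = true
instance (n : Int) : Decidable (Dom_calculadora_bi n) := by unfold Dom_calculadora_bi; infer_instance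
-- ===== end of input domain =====

-- B replaces A's digit-accumulating while-loop + ''.join/int() reparse by the one-liner int(format(n,'b')).

-- ===== PORT A =====
-- the while-loop of A: state is (n, bi); fuel only makes the recursion total
-- (unreachable for the admitted inputs: 0 ≤ n ≤ 2^31 needs at most 33 iterations)
def pvLoopA : Nat → Int → List String → Int × List String
  | 0, n, bi => (n, bi)
  | fuel+1, n, bi =>
      let res := PySem.Int.toStr (PySem.Int.mod n 2)
      let n' := PySem.Int.floordiv n 2
      let bi' := res :: bi
      if n' = 0 ∨ n' = 1 then (n', bi') else pvLoopA fuel n' bi'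

def calculadora_bi (n : Int) : Int :=
  let r := pvLoopA 64 n []
  let numero := PySem.Str.join "" (PySem.Int.toStr r.1 :: r.2)
  -- int(numero): the string is all decimal digits here, so int() never raises; the getD 0 is unreachable
  (PySem.Int.ofStr? numero).getD 0

-- ===== PORT B =====
def calculadora_bi_alt (n : Int) : Int :=
  -- int(format(n, "b")); int() never raises on format's output, the getD 0 is unreachable
  (PySem.Int.ofStr? (PySem.Int.toBin n)).getD 0

-- ===== PRECONDITION & SPEC =====
-- Pre_ excludes negative n: there A's while-loop never terminates (floor division keeps the value negative), so A returns exactly on the non-negative integers.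
def Pre_calculadora_bi (n : Int) : Prop := 0 ≤ n
instance (n : Int) : Decidable (Pre_calculadora_bi n) := by unfold Pre_calculadora_bi; infer_instance
def pvWitness_calculadora_bi : Int := 5

def Spec_calculadora_bi (n : Int) (out : Int) : Prop := out = calculadora_bi_alt n
instance (n : Int) (out : Int) : Decidable (Spec_calculadora_bi n out) := by unfold Spec_calculadora_bi; infer_instance

-- ===== CLAIM (what is proved, stated in full; the proofs are below) =====
def Claim_equal_calculadora_bi : Prop := ∀ (n : Int), Dom_calculadora_bi n → Pre_calculadora_bi n → Spec_calculadora_bi n (calculadora_bi n)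

-- ===== LEMMAS AND PROOFS =====

-- the loop invariant: for 2 ≤ m the loop ends with final quotient 1, having emitted
-- (as one-character strings, most significant first) exactly the binary digits of m after the leading '1'
lemma pvLoopA_spec : ∀ (fuel m : Nat) (bi : List String), 2 ≤ m → m < 2^(fuel+1) →
    ∃ ds : List Char, Nat.toDigits 2 m = '1' :: ds ∧
      pvLoopA fuel (m : Int) bi = (1, ds.map (fun c => String.ofList [c]) ++ bi) := by
  intro fuel
  induction fuel with
  | zero => intro m bi h2 hlt; exfalso; simp [pow_succ] at hlt; omega
  | succ f ih =>
      intro m bi h2 hlt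
      have hmod : PySem.Int.mod (m : Int) 2 = ((m % 2 : Nat) : Int) := by
        exact_mod_cast PySem.Int.mod_natCast m 2
      have hdiv : PySem.Int.floordiv (m : Int) 2 = ((m / 2 : Nat) : Int) := by
        exact_mod_cast PySem.Int.floordiv_natCast m 2
      have hd2 : 1 ≤ m / 2 := by omega
      by_cases hstop : m / 2 = 1
      · -- m = 2 or m = 3: the loop stops on this iteration
        have : m = 2 ∨ m = 3 := by omega
        rcases this with rfl | rfl
        · exact ⟨['0'], by decide, by simp [pvLoopA]; decide⟩
        · exact ⟨['1'], by decide, by simp [pvLoopA]; decide⟩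
      · -- m / 2 ≥ 2: one more iteration, then the induction hypothesis
        have hge : 2 ≤ m / 2 := by omega
        have hlt' : m / 2 < 2^(f+1) := by
          have : m < 2^(f+1) * 2 := by rw [← pow_succ]; exact hlt
          omega
        obtain ⟨ds', hds', hloop⟩ := ih (m / 2) (PySem.Int.toStr ((m % 2 : Nat) : Int) :: bi) hge hlt'
        refine ⟨ds' ++ [(m % 2).digitChar], ?_, ?_⟩
        · rw [Nat.toDigits_eq_if (by norm_num), if_neg (by omega), hds']; simp
        · have hcond : ¬ (((m / 2 : Nat) : Int) = 0 ∨ ((m / 2 : Nat) : Int) = 1) := by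
            push_cast; omega
          simp only [pvLoopA, hmod, hdiv, if_neg hcond]
          rw [hloop]
          have hσ : String.ofList [(m % 2).digitChar] = PySem.Int.toStr ((m % 2 : Nat) : Int) := by
            rcases Nat.mod_two_eq_zero_or_one m with h | h <;> rw [h] <;> decide
          simp [hσ]

-- both ports parse the same character list ⇒ equal results
theorem calculadora_bi_spec : Claim_equal_calculadora_bi := by
  intro n hdom hpre
  unfold Spec_calculadora_bi
  unfold Dom_calculadora_bi pvDomInt at hdom
  unfold Pre_calculadora_bi at hpre
  simp only [decide_eq_true_eq] at hdom
  have : n = 0 ∨ n = 1 ∨ 2 ≤ n := by omega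
  rcases this with rfl | rfl | h2
  · decide
  · decide
  · -- n ≥ 2
    set m : Nat := n.toNat with hm
    have hn : (m : Int) = n := Int.toNat_of_nonneg hpre
    have hm2 : 2 ≤ m := by omega
    have hmlt : m < 2^65 := by
      have h1 : m ≤ 2147483648 := by omega
      have h2 : (2147483648 : Nat) < 2^65 := by norm_num
      omega
    obtain ⟨ds, hds, hloop⟩ := pvLoopA_spec 64 m [] hm2 hmlt
    rw [← hn]
    -- the joined string of port A is exactly the binary digit list of m
    have hjoin : (PySem.Str.join "" (PySem.Int.toStr (1 : Int) ::
        (ds.map (fun c => String.ofList [c]) ++ []))).toList = Nat.toDigits 2 m := by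
      rw [List.append_nil, PySem.Str.toList_join]
      have h1 : (PySem.Int.toStr (1 : Int)).toList = ['1'] := by decide
      simp only [List.map_cons, List.map_map, h1]
      have h2 : (String.toList ∘ fun c => String.ofList [c]) = fun c => [c] := by
        funext c; simp
      rw [h2]
      rw [show (['1'] : List Char) :: List.map (fun c : Char => [c]) ds
            = List.map (fun c : Char => [c]) ('1' :: ds) from rfl,
         show ("".toList : List Char) = [] from rfl,
         PySem.Chars.join_nil_singletons, hds]
    -- port B's string is the same digit list
    have hb : (PySem.Int.toBin ((m : Nat) : Int)).toList = Nat.toDigits 2 m := by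
      rw [PySem.Int.toList_toBin]
      unfold PySem.Int.toBinChars
      rw [if_neg (by exact not_lt.mpr (Int.natCast_nonneg m)), Int.toNat_natCast]
    simp only [calculadora_bi, calculadora_bi_alt, hloop, PySem.Int.ofStr?]
    rw [hjoin, hb]
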